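-- pv_equiv track=rewrite | github.com/ccc114b/cccocw | 系統程式/_book/sp_py/_code/06/06-3-pipeline.py | find_ilp
-- ===== SOURCE A (Python) =====
-- def find_ilp(instructions):
--     """找出指令級並行性"""
--     # 依賴圖
--     dependencies = {
--         'add': ['load'],
--         'mul': ['add'],
--         'store': ['mul']
--     }
--
--     # 簡單的排程
--     ready = [i for i, instr in enumerate(instructions)
--              if instr not in dependencies or
--              all(dep in instructions[:i] for dep in dependencies[instr])]
--
--     return ready
-- ===== SOURCE B (Python) =====
-- def find_ilp(instructions):
--     """找出指令級並行性 — precompute, per dependency-graph key, the earliest index at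
--     which it becomes ready (one .index scan per dependency name), then emit the
--     indices whose position reaches that threshold."""
--     dependencies = {
--         'add': ['load'],
--         'mul': ['add'],
--         'store': ['mul']
--     }
--     n = len(instructions)
--     threshold = {}
--     for name, deps in dependencies.items():
--         t = 0
--         for dep in deps:
--             t = max(t, instructions.index(dep) + 1 if dep in instructions else n + 1)
--         threshold[name] = t
--     return [i for i, instr in enumerate(instructions) if i >= threshold.get(instr, 0)]
-- ===== Notes on version B (the rewrite author's own statement) =====
-- stated objective: faster
-- what changed: B replaces A's per-index re-scan of the prefix slice with two staged passes: it first precomputes, for each of the three dependency-graph keys, the earliest index at which that key becomes ready (one .index scan per dependency name), then emits exactly the indices that reach their key's readiness threshold.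
import Mathlib
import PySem

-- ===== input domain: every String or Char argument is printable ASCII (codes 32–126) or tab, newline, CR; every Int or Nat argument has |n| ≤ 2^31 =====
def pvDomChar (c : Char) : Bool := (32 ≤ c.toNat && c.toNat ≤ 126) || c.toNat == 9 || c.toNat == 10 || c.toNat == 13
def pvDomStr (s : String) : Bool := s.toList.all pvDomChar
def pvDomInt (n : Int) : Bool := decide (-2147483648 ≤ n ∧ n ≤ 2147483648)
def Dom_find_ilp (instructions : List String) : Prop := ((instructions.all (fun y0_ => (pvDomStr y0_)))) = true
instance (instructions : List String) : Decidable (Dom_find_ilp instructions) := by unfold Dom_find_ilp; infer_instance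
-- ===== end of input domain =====

-- B precomputes, for each key of the fixed dependency graph, the earliest index at which it becomes
-- ready (one .index scan per dependency name), then emits the indices reaching that threshold —
-- objective: faster (no per-index prefix re-scan).

-- ===== PORT A =====
-- the literal dependency dict of A
def pvDepsA : PySem.Dict String (List String) :=
  PySem.Dict.ofList [("add", ["load"]), ("mul", ["add"]), ("store", ["mul"])]

def find_ilp (instructions : List String) : List Int :=
  let dependencies := pvDepsA
  let ready :=
    ((PySem.List.enumerate instructions 0).filter (fun p =>
        !(dependencies.contains p.2) ||
        ((dependencies.getD p.2 []).all (fun dep =>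
          (PySem.List.slice instructions none (some p.1)).contains dep)))).map (·.1)
  ready

-- ===== PORT B =====
-- the same literal dependency dict, as written in Source B
def pvDepsB : PySem.Dict String (List String) :=
  PySem.Dict.ofList [("add", ["load"]), ("mul", ["add"]), ("store", ["mul"])]

-- Source B's first loop: per dependency-graph key, the earliest index at which it is ready
-- ('instructions.index(dep) + 1 if dep in instructions else n + 1'; index? is some here
-- exactly when the contains-guard is true, so .getD 0 is the successful .index value)
def pvThreshold (instructions : List String) : PySem.Dict String Int :=
  pvDepsB.items.foldl (fun th p =>
    th.insert p.1 (p.2.foldl (fun t dep =>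
      max t (if instructions.contains dep
             then (((PySem.List.index? instructions dep).getD 0 : Nat) : Int) + 1
             else (PySem.List.len instructions) + 1)) 0)) PySem.Dict.empty

def find_ilp_alt (instructions : List String) : List Int :=
  let threshold := pvThreshold instructions
  ((PySem.List.enumerate instructions 0).filter
      (fun q => decide (threshold.getD q.2 0 ≤ q.1))).map (·.1)

-- ===== PRECONDITION & SPEC =====
def Spec_find_ilp (instructions : List String) (out : List Int) : Prop := out = find_ilp_alt instructions
instance (instructions : List String) (out : List Int) : Decidable (Spec_find_ilp instructions out) := by unfold Spec_find_ilp; infer_instance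

-- ===== CLAIM (what is proved, stated in full; the proofs are below) =====
def Claim_equal_find_ilp : Prop := ∀ (instructions : List String), Dom_find_ilp instructions → Spec_find_ilp instructions (find_ilp instructions)

-- ===== LEMMAS AND PROOFS =====

-- Source B's per-dependency readiness value
def pvVal (xs : List String) (d : String) : Int :=
  if xs.contains d
  then (((PySem.List.index? xs d).getD 0 : Nat) : Int) + 1
  else (xs.length : Int) + 1

-- the threshold dict evaluated key by key
lemma pvThreshold_getD (xs : List String) (s : String) :
    (pvThreshold xs).getD s 0 =
      if s = "store" then max 0 (pvVal xs "mul")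
      else if s = "mul" then max 0 (pvVal xs "add")
      else if s = "add" then max 0 (pvVal xs "load")
      else 0 := by
  unfold pvThreshold
  rw [show pvDepsB.items = [("add", ["load"]), ("mul", ["add"]), ("store", ["mul"])] from rfl]
  simp only [List.foldl_cons, List.foldl_nil]
  simp only [PySem.Dict.getD_insert, PySem.Dict.getD_empty, pvVal, PySem.List.len_eq]

-- membership of d in the length-k prefix equals reaching Source B's readiness value
lemma pv_take_contains (xs : List String) (d : String) (k : Nat) (hk : k < xs.length) :
    (xs.take k).contains d = decide (max 0 (pvVal xs d) ≤ (k : Int)) := by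
  by_cases hd : d ∈ xs
  · obtain ⟨k0, hk0⟩ := Option.isSome_iff_exists.mp
      ((PySem.List.index?_isSome_iff (xs := xs) (v := d)).mpr hd)
    have hidx : xs.idxOf d = k0 := by
      have h := List.idxOf_eq_getD_idxOf? d xs
      rw [← PySem.List.index?_eq_idxOf?, hk0] at h
      simpa using h
    have hk0' : List.idxOf? d xs = some k0 := by
      rw [← PySem.List.index?_eq_idxOf?]; exact hk0
    have hval : pvVal xs d = (k0 : Int) + 1 := by
      simp [pvVal, hd, hk0']
    rw [hval, max_eq_right (by positivity : (0 : Int) ≤ (k0 : Int) + 1)]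
    have hmem : d ∈ xs.take k ↔ k0 < k := by
      rw [List.mem_take_iff_idxOf_lt hd, hidx]
    have : ((k0 : Int) + 1 ≤ (k : Int)) ↔ k0 < k := by omega
    simp [hmem, this]
  · have hval : pvVal xs d = (xs.length : Int) + 1 := by
      simp [pvVal, hd]
    rw [hval, max_eq_right (by positivity : (0 : Int) ≤ (xs.length : Int) + 1)]
    have h1 : d ∉ xs.take k := fun h => hd (List.take_subset _ _ h)
    have h2 : ¬ ((xs.length : Int) + 1 ≤ (k : Int)) := by omega
    simp [h1, h2]

-- the two filter conditions agree on every genuine (index, element) pair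
lemma pv_cond_eq (xs : List String) (k : Nat) (hk : k < xs.length) (s : String) :
    (!(pvDepsA.contains s) ||
      ((pvDepsA.getD s []).all (fun dep =>
        (PySem.List.slice xs none (some (k : Int))).contains dep)))
    = decide ((pvThreshold xs).getD s 0 ≤ (k : Int)) := by
  rw [PySem.List.slice_to_natCast, pvThreshold_getD]
  by_cases h1 : s = "add"
  · subst h1
    rw [show pvDepsA.contains "add" = true by decide,
        show pvDepsA.getD "add" [] = ["load"] by decide]
    simpa using pv_take_contains xs "load" k hk
  · by_cases h2 : s = "mul"
    · subst h2
      rw [show pvDepsA.contains "mul" = true by decide,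
          show pvDepsA.getD "mul" [] = ["add"] by decide]
      simpa using pv_take_contains xs "add" k hk
    · by_cases h3 : s = "store"
      · subst h3
        rw [show pvDepsA.contains "store" = true by decide,
            show pvDepsA.getD "store" [] = ["mul"] by decide]
        simpa using pv_take_contains xs "mul" k hk
      · have hc : pvDepsA.contains s = false := by
          rw [PySem.Dict.contains_eq_decide_mem_keys,
              show pvDepsA.keys = ["add", "mul", "store"] from rfl]
          simp [h1, h2, h3]
        have h0 : (0 : Int) ≤ (k : Int) := by positivity
        rw [hc]
        simp [h1, h2, h3, h0]

-- ===== VERDICT (by name: the statement is the Claim_ definition above) =====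
theorem find_ilp_spec : Claim_equal_find_ilp := by
  intro xs _
  unfold Spec_find_ilp find_ilp find_ilp_alt
  simp only []
  congr 1
  apply List.filter_congr
  intro p hp
  rcases (PySem.List.mem_enumerate_iff _ _ _).1 hp with ⟨k, hklt, rfl⟩
  simp only [zero_add]
  exact pv_cond_eq xs k hklt xs[k]
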